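-- pv_equiv track=rewrite | github.com/comkg/ProjectEuler | 101/101.py | u
-- ===== SOURCE A (Python) =====
-- def q_pow(x, y):
--     res = 1
--     while y > 0:
--         if y & 1:
--             res *= x
--         x *= x
--         y //= 2
--     return res
--
-- def u(x):
--     res = 0
--     for i in range(11):
--         if i & 1:
--             res -= q_pow(x, i)
--         else:
--             res += q_pow(x, i)
--     return res
-- ===== SOURCE B (Python) =====
-- def u(x):
--     res = 0
--     for c in (1, -1, 1, -1, 1, -1, 1, -1, 1, -1, 1):
--         res = res * x + c
--     return res
-- ===== Notes on version B (the rewrite author's own statement) =====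
-- stated objective: idiomatic
-- what changed: Replaces eleven independent exponentiation-by-squaring calls summed with alternating signs by a single Horner fold res = res*x + c over the fixed coefficient list.
import Mathlib
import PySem

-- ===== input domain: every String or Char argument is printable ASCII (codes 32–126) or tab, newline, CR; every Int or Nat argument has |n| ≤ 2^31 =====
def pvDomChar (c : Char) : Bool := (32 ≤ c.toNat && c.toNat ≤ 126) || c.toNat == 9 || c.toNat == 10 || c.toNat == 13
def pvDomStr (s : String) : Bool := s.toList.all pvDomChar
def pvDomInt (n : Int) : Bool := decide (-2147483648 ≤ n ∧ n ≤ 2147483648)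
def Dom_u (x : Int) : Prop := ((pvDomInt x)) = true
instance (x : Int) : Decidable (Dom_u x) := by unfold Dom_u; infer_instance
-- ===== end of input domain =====

-- B evaluates the same degree-10 alternating polynomial by a single Horner fold instead of eleven exponentiation-by-squaring calls.

-- ===== PORT A =====
-- q_pow's while loop: state (x, res, y), y halves each iteration
def qPowLoop (x res y : Int) : Int :=
  if _h : y > 0 then
    let res' := if PySem.Int.band y 1 ≠ 0 then res * x else res
    qPowLoop (x * x) res' (PySem.Int.floordiv y 2)
  else res
termination_by y.toNat
decreasing_by
  have : PySem.Int.floordiv y 2 = y / 2 := PySem.Int.floordiv_eq_ediv_of_pos (by omega)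
  rw [this]; omega

def q_pow (x y : Int) : Int := qPowLoop x 1 y

def u (x : Int) : Int :=
  (PySem.List.pyRange 0 11 1).foldl
    (fun res i => if PySem.Int.band i 1 ≠ 0 then res - q_pow x i else res + q_pow x i) 0

-- ===== PORT B =====
def u_alt (x : Int) : Int :=
  ([1, -1, 1, -1, 1, -1, 1, -1, 1, -1, 1] : List Int).foldl (fun res c => res * x + c) 0

-- ===== PRECONDITION & SPEC =====
def Spec_u (x : Int) (out : Int) : Prop := out = u_alt x
instance (x : Int) (out : Int) : Decidable (Spec_u x out) := by unfold Spec_u; infer_instance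

-- ===== CLAIM (what is proved, stated in full; the proofs are below) =====
def Claim_equal_u : Prop := ∀ (x : Int), Dom_u x → Spec_u x (u x)

-- ===== LEMMAS AND PROOFS =====

theorem qPowLoop_eq (n : Nat) : ∀ (x res y : Int), 0 ≤ y → y.toNat = n →
    qPowLoop x res y = res * x ^ n := by
  induction n using Nat.strong_induction_on with
  | _ n ih =>
    intro x res y hy hn
    rw [qPowLoop]
    by_cases h : y > 0
    · have hf : PySem.Int.floordiv y 2 = y / 2 := PySem.Int.floordiv_eq_ediv_of_pos (by omega)
      have hb : PySem.Int.band y 1 = PySem.Int.mod y 2 := PySem.Int.band_one y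
      have hm : PySem.Int.mod y 2 = y % 2 := PySem.Int.mod_eq_emod_of_pos (by omega)
      have h2 : (y / 2).toNat = n / 2 := by omega
      rw [dif_pos h]
      simp only [hf, hb, hm]
      have hpow : (x * x) ^ (n / 2) = x ^ (2 * (n / 2)) := by
        rw [pow_mul, pow_two]
      by_cases hodd : y % 2 = 0
      · have hn2 : n % 2 = 0 := by omega
        simp only [hodd]
        rw [if_neg (by decide), ih (n / 2) (by omega) (x * x) res (y / 2) (by omega) h2, hpow]
        have hnn : 2 * (n / 2) = n := by omega
        rw [hnn]
      · have hy1 : y % 2 = 1 := by omega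
        have hn2 : n % 2 = 1 := by omega
        simp only [hy1]
        rw [if_pos (by decide), ih (n / 2) (by omega) (x * x) (res * x) (y / 2) (by omega) h2,
          hpow, mul_assoc, ← pow_succ']
        have hnn : 2 * (n / 2) + 1 = n := by omega
        rw [hnn]
    · have : n = 0 := by omega
      simp [h, this]

theorem q_pow_eq (x y : Int) (hy : 0 ≤ y) : q_pow x y = x ^ y.toNat :=
  by rw [q_pow, qPowLoop_eq y.toNat x 1 y hy rfl, one_mul]

theorem u_poly (x : Int) : u x =
    x^10 - x^9 + x^8 - x^7 + x^6 - x^5 + x^4 - x^3 + x^2 - x + 1 := by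
  unfold u
  have hr : PySem.List.pyRange 0 11 1 = [0,1,2,3,4,5,6,7,8,9,10] := by decide
  rw [hr]
  simp only [List.foldl]
  norm_num [q_pow_eq, PySem.Int.band_one, PySem.Int.mod_eq_emod_of_pos]
  have ht : ∀ k : Nat, (Int.toNat (OfNat.ofNat k) : Nat) = OfNat.ofNat k := fun k => rfl
  simp only [ht]
  ring

theorem u_alt_poly (x : Int) : u_alt x =
    x^10 - x^9 + x^8 - x^7 + x^6 - x^5 + x^4 - x^3 + x^2 - x + 1 := by
  simp only [u_alt, List.foldl]
  ring

-- ===== VERDICT (by name: the statement is the Claim_ definition above) =====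
theorem u_spec : Claim_equal_u := by
  intro x _
  show u x = u_alt x
  rw [u_poly, u_alt_poly]
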